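-- pv_equiv track=rewrite | github.com/milu-buet/Competitive-Programming | Facebook Hackercup/2019 Round 3/Light Show/Solution.py | prefsum
-- ===== SOURCE A (Python) =====
-- def prefsum(pos_col):
-- 	c1=0
-- 	c2=0
-- 	n = len(pos_col)
-- 	C1=[0]*n
-- 	C2=[0]*n
--
-- 	for i in range(n):
-- 		if pos_col[i][1]==1:
-- 			c1+=1
-- 		else:
-- 			c2+=1
--
-- 		C1[i] = c1
-- 		C2[i] = c2
--
-- 	return C1,C2
-- ===== SOURCE B (Python) =====
-- def prefsum(pos_col):
--     C1 = []
--     c = 0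
--     for _, col in pos_col:
--         if col == 1:
--             c += 1
--         C1.append(c)
--     C2 = [i + 1 - v for i, v in enumerate(C1)]
--     return C1, C2
-- ===== Notes on version B (the rewrite author's own statement) =====
-- stated objective: simpler
-- what changed: B keeps a single counter for category 1 and derives the second prefix array arithmetically from the invariant that exactly one counter increments per element (C2[i] = i+1 - C1[i]), instead of maintaining a parallel second counter and preallocated index-written arrays.
import Mathlib
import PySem

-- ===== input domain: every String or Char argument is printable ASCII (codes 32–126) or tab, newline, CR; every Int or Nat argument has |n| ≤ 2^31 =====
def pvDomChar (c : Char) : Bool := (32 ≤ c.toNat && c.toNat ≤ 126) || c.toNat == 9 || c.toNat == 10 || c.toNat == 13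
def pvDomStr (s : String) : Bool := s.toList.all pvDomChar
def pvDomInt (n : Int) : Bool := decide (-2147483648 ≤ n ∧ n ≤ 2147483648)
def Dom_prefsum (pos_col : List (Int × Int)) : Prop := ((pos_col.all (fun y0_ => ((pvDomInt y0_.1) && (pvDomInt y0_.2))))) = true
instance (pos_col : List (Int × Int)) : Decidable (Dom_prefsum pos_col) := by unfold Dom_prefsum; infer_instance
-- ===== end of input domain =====

-- B keeps one counter and derives C2 arithmetically (C2[i] = i+1 - C1[i]) instead of a parallel second counter; objective: simpler.

-- ===== PORT A =====
-- A's loop body: read pos_col[i], bump c1 or c2, write C1[i], C2[i].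
def prefsumStep (pos_col : List (Int × Int)) (st : Int × Int × List Int × List Int) (i : Int) :
    Int × Int × List Int × List Int :=
  let c1 := if (PySem.List.pyGetD pos_col i (0, 0)).2 = 1 then st.1 + 1 else st.1
  let c2 := if (PySem.List.pyGetD pos_col i (0, 0)).2 = 1 then st.2.1 else st.2.1 + 1
  (c1, c2, st.2.2.1.set i.toNat c1, st.2.2.2.set i.toNat c2)

def prefsum (pos_col : List (Int × Int)) : List Int × List Int :=
  let n : Int := pos_col.length
  let st := (PySem.List.pyRange 0 n 1).foldl (prefsumStep pos_col)
    (0, 0, List.replicate n.toNat 0, List.replicate n.toNat 0)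
  (st.2.2.1, st.2.2.2)

-- ===== PORT B =====
def prefsum_alt (pos_col : List (Int × Int)) : List Int × List Int :=
  let r := pos_col.foldl (fun (st : Int × List Int) p =>
      let c := if p.2 = 1 then st.1 + 1 else st.1
      (c, st.2 ++ [c])) (0, ([] : List Int))
  let C1 := r.2
  let C2 := (PySem.List.enumerate C1 0).map (fun iv => iv.1 + 1 - iv.2)
  (C1, C2)

-- ===== PRECONDITION & SPEC =====
def Spec_prefsum (pos_col : List (Int × Int)) (out : List Int × List Int) : Prop := out = prefsum_alt pos_col
instance (pos_col : List (Int × Int)) (out : List Int × List Int) : Decidable (Spec_prefsum pos_col out) := by unfold Spec_prefsum; infer_instance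

-- ===== CLAIM (what is proved, stated in full; the proofs are below) =====
def Claim_equal_prefsum : Prop := ∀ (pos_col : List (Int × Int)), Dom_prefsum pos_col → Spec_prefsum pos_col (prefsum pos_col)

-- ===== LEMMAS AND PROOFS =====

-- reference prefix streams: f1 = running count of col=1, f2 = running count of col≠1
def f1 : List (Int × Int) → Int → List Int
  | [], _ => []
  | p :: rest, c => (if p.2 = 1 then c + 1 else c) :: f1 rest (if p.2 = 1 then c + 1 else c)

def f2 : List (Int × Int) → Int → List Int
  | [], _ => []
  | p :: rest, c => (if p.2 = 1 then c else c + 1) :: f2 rest (if p.2 = 1 then c else c + 1)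

theorem loopA (pos : List (Int × Int)) :
    ∀ (rest done : List (Int × Int)) (c1 c2 : Int) (P1 P2 : List Int),
      pos = done ++ rest → P1.length = done.length → P2.length = done.length →
      (((PySem.List.pyRange done.length pos.length 1).foldl (prefsumStep pos)
          (c1, c2, P1 ++ List.replicate rest.length 0, P2 ++ List.replicate rest.length 0)).2.2.1
        = P1 ++ f1 rest c1) ∧
      (((PySem.List.pyRange done.length pos.length 1).foldl (prefsumStep pos)
          (c1, c2, P1 ++ List.replicate rest.length 0, P2 ++ List.replicate rest.length 0)).2.2.2
        = P2 ++ f2 rest c2) := by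
  intro rest
  induction rest with
  | nil =>
    intro done c1 c2 P1 P2 hpos h1 h2
    subst hpos
    rw [PySem.List.pyRange_one_eq_nil (by simp)]
    exact ⟨by simp [f1], by simp [f2]⟩
  | cons p rest' ih =>
    intro done c1 c2 P1 P2 hpos h1 h2
    subst hpos
    have hlt : (done.length : Int) < ((done ++ p :: rest').length : Int) := by
      simp
    rw [PySem.List.pyRange_one_cons hlt]
    simp only [List.foldl_cons]
    have hget : PySem.List.pyGetD (done ++ p :: rest') (done.length : Int) ((0 : Int), (0 : Int)) = p := by
      rw [PySem.List.pyGetD_natCast]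
      simp [List.getD]
    have hset1 : ∀ (c : Int), (P1 ++ List.replicate (p :: rest').length (0 : Int)).set
        ((done.length : Int)).toNat c = (P1 ++ [c]) ++ List.replicate rest'.length 0 := by
      intro c
      simp [h1, List.replicate_succ]
    have hset2 : ∀ (c : Int), (P2 ++ List.replicate (p :: rest').length (0 : Int)).set
        ((done.length : Int)).toNat c = (P2 ++ [c]) ++ List.replicate rest'.length 0 := by
      intro c
      simp [h2, List.replicate_succ]
    simp only [prefsumStep, hget, hset1, hset2]
    have hlen : ((done ++ [p]).length : Int) = (done.length : Int) + 1 := by simp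
    have := ih (done ++ [p])
      (if p.2 = 1 then c1 + 1 else c1) (if p.2 = 1 then c2 else c2 + 1)
      (P1 ++ [if p.2 = 1 then c1 + 1 else c1]) (P2 ++ [if p.2 = 1 then c2 else c2 + 1])
      (by simp) (by simp [h1]) (by simp [h2])
    rcases this with ⟨e1, e2⟩
    constructor
    · rw [show ((done.length : Int) + 1) = ((done ++ [p]).length : Int) by simp,
        show (done ++ p :: rest' : List (Int × Int)) = ((done ++ [p]) ++ rest') by simp] at *
      rw [e1]
      simp [f1]
    · rw [show ((done.length : Int) + 1) = ((done ++ [p]).length : Int) by simp,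
        show (done ++ p :: rest' : List (Int × Int)) = ((done ++ [p]) ++ rest') by simp] at *
      rw [e2]
      simp [f2]

theorem prefsum_eq_ref (pos : List (Int × Int)) :
    prefsum pos = (f1 pos 0, f2 pos 0) := by
  have h := loopA pos pos [] 0 0 [] [] (by simp) (by simp) (by simp)
  simp only [List.nil_append, List.length_nil, Nat.cast_zero] at h
  unfold prefsum
  simp only [Int.toNat_natCast]
  exact Prod.ext h.1 h.2

theorem loopB (xs : List (Int × Int)) :
    ∀ (c : Int) (acc : List Int),
      (xs.foldl (fun (st : Int × List Int) p =>
        let c := if p.2 = 1 then st.1 + 1 else st.1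
        (c, st.2 ++ [c])) (c, acc)).2 = acc ++ f1 xs c := by
  induction xs with
  | nil => intro c acc; simp [f1]
  | cons p rest ih =>
    intro c acc
    simp only [List.foldl_cons]
    rw [ih]
    simp [f1]

theorem comp_lemma (xs : List (Int × Int)) :
    ∀ (c1 c2 s : Int), s = c1 + c2 →
      (PySem.List.enumerate (f1 xs c1) s).map (fun iv => iv.1 + 1 - iv.2) = f2 xs c2 := by
  induction xs with
  | nil => intro c1 c2 s hs; simp [f1, f2, PySem.List.enumerate_nil]
  | cons p rest ih =>
    intro c1 c2 s hs
    simp only [f1, f2, PySem.List.enumerate_cons, List.map_cons]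
    by_cases hp : p.2 = 1
    · simp only [hp, if_true]
      have hh : s + 1 - (c1 + 1) = c2 := by omega
      rw [hh, ih (c1 + 1) c2 (s + 1) (by omega)]
    · simp only [hp, if_false]
      have hh : s + 1 - c1 = c2 + 1 := by omega
      rw [hh, ih c1 (c2 + 1) (s + 1) (by omega)]

theorem prefsum_alt_eq_ref (pos : List (Int × Int)) :
    prefsum_alt pos = (f1 pos 0, f2 pos 0) := by
  simp only [prefsum_alt, loopB, List.nil_append, comp_lemma pos 0 0 0 (by norm_num)]

-- ===== VERDICT (by name: the statement is the Claim_ definition above) =====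
theorem prefsum_spec : Claim_equal_prefsum := by
  intro pos _
  unfold Spec_prefsum
  rw [prefsum_eq_ref, prefsum_alt_eq_ref]
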